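-- pv_equiv track=rewrite | github.com/GuiJR777/INE5603-01238A-20201---Programa-o-Orientada-a-Objetos-I | prova/Question_1.py | confere_linha
-- ===== SOURCE A (Python) =====
-- def confere_linha(numero, linha):
--     '''
--         param numero: Recebe valor que esta sob analise
--         param linha: Recebe a lista com valores da linha que esta sob analise
--         return: Retorna um booleano que indicca se o numero é o menor de sua linha
--     '''
--     resposta = True
--     for i in linha:
--         if numero <= int(i) and numero >= 1:
--             pass
--         else:
--             resposta = False
--     return resposta
-- ===== SOURCE B (Python) =====
-- def confere_linha(numero, linha):
--     if not linha:
--         return True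
--     menor = sorted(int(i) for i in linha)[0]
--     return 1 <= numero <= menor
-- ===== Notes on version B (the rewrite author's own statement) =====
-- stated objective: alternative
-- what changed: Instead of scanning the line with a boolean flag ANDed per element, B sorts the line and compares numero against the first (smallest) element of the sorted list in one bounds check, with an explicit True for the empty line.
import Mathlib
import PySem

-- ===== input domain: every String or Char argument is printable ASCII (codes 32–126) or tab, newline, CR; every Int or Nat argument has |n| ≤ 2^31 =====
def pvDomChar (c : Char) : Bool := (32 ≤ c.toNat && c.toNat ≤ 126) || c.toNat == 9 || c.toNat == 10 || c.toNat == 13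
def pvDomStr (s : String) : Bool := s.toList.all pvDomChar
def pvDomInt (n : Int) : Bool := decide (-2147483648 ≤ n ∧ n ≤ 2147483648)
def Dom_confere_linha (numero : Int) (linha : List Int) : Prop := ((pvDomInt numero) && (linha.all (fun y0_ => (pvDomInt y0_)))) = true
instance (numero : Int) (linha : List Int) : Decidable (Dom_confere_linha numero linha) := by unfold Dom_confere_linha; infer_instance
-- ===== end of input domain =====

-- B sorts the line and checks numero against the first (smallest) element, instead of A's per-element flag loop (objective: alternative).


-- ===== PORT A =====
def confere_linha (numero : Int) (linha : List Int) : Bool :=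
  linha.foldl (fun resposta i => if numero ≤ i ∧ numero ≥ 1 then resposta else false) true

-- ===== PORT B =====
def confere_linha_alt (numero : Int) (linha : List Int) : Bool :=
  match linha with
  | [] => true
  | _ :: _ =>
    match PySem.List.sorted linha (fun x => x) false with
    | menor :: _ => decide (1 ≤ numero ∧ numero ≤ menor)
    | [] => false  -- unreachable: sorted of a nonempty list is nonempty

-- ===== PRECONDITION & SPEC =====
def Spec_confere_linha (numero : Int) (linha : List Int) (out : Bool) : Prop := out = confere_linha_alt numero linha
instance (numero : Int) (linha : List Int) (out : Bool) : Decidable (Spec_confere_linha numero linha out) := by unfold Spec_confere_linha; infer_instance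

-- ===== CLAIM =====
def Claim_equal_confere_linha : Prop := ∀ (numero : Int) (linha : List Int), Dom_confere_linha numero linha → Spec_confere_linha numero linha (confere_linha numero linha)

-- ===== LEMMAS AND PROOFS =====

theorem confere_linha_foldl_all (numero : Int) (xs : List Int) (b : Bool) :
    xs.foldl (fun resposta i => if numero ≤ i ∧ numero ≥ 1 then resposta else false) b
      = (b && xs.all (fun i => decide (numero ≤ i ∧ numero ≥ 1))) := by
  induction xs generalizing b with
  | nil => simp
  | cons y ys ih =>
    simp only [List.foldl_cons, List.all_cons, ih]
    by_cases h : numero ≤ y ∧ numero ≥ 1 <;> simp [h]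

-- ===== VERDICT =====
theorem confere_linha_spec : Claim_equal_confere_linha := by
  intro numero linha _
  unfold Spec_confere_linha confere_linha confere_linha_alt
  cases linha with
  | nil => rfl
  | cons x xs =>
    cases hs : PySem.List.sorted (x :: xs) (fun x => x) false with
    | nil => exact absurd ((PySem.List.sorted_eq_nil_iff (xs := x :: xs) (key := fun x => x) (rev := false)).mp hs) (by simp)
    | cons m t =>
      have hm : m ∈ x :: xs := by
        have := PySem.List.mem_sorted (xs := x :: xs) (key := fun x => x) (rev := false) (x := m)
        rw [hs] at this; exact this.mp (List.mem_cons_self ..)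
      have hle : ∀ y ∈ x :: xs, m ≤ y :=
        PySem.List.key_head_sorted_le (xs := x :: xs) (key := fun x => x) hs
      simp only [confere_linha_foldl_all, Bool.true_and]
      rw [Bool.eq_iff_iff]
      simp only [List.all_eq_true, decide_eq_true_eq]
      constructor
      · rintro h
        have hm' := h m hm
        exact ⟨hm'.2, hm'.1⟩
      · rintro ⟨h1, hlem⟩ i hi
        exact ⟨le_trans hlem (hle i hi), h1⟩
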